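-- pv_equiv track=rewrite | github.com/daviscvance/Practice | Leetcode/Python/largest-number-less-than-n.py | largest_number_less_than_n
-- ===== SOURCE A (Python) =====
-- def largest_number_less_than_n(n: int, A):
--     n = list(str(n))
--     A = sorted(A, reverse=True)
--
--     def helper(i, flag):
--         if i == len(n):
--             return []
--         for digit in (A if flag else [d for d in A if d <= int(n[i])]):
--             res = helper(i + 1, flag or digit < int(n[i]))
--             if res is not None:
--                 return [digit] + res
--         return None
--
--     return int(''.join(map(str, helper(0, False))))
-- ===== SOURCE B (Python) =====
-- def largest_number_less_than_n(n: int, A):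
--     # Greedy without backtracking search: keep n's digits while possible; on failure
--     # drop at the current position to the largest smaller available digit and pad with the max.
--     digits = set(A)
--     mx = max(digits)
--
--     def best_below(d):
--         below = [a for a in digits if a < d]
--         return max(below) if below else None
--
--     def go(ds):
--         if not ds:
--             return []
--         d0, rest = ds[0], ds[1:]
--         if d0 in digits:
--             tail = go(rest)
--             if tail is not None:
--                 return [d0] + tail
--         b = best_below(d0)
--         if b is None:
--             return None
--         return [b] + [mx] * len(rest)
--
--     res = go([int(c) for c in str(n)])
--     return int(''.join(map(str, res)))
-- ===== Notes on version B (the rewrite author's own statement) =====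
-- stated objective: faster
-- what changed: Replaces A's backtracking depth-first search over duplicated sorted candidate digits (exponential on duplicate-heavy digit lists) by a single greedy pass over n's digits on a deduplicated digit set: match each digit while possible, otherwise drop once at the deepest feasible position to the largest smaller digit and pad with the maximum.
import Mathlib
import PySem

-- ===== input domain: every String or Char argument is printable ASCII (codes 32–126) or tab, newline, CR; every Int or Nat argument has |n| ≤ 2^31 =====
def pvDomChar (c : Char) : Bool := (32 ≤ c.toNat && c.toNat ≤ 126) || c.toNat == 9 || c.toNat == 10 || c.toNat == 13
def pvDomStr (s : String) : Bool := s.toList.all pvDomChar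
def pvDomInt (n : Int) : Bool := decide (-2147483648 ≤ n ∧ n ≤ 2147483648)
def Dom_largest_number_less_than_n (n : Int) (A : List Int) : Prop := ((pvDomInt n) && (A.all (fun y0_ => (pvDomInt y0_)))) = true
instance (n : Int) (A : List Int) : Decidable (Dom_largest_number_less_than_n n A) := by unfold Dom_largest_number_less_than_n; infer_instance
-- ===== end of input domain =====

-- B replaces A's backtracking depth-first search over sorted candidate digits by a single
-- greedy pass over n's digits (match while possible, else drop once and pad with the maximum).

-- int(ch) for a decimal digit character (Python raises on non-digit chars; such inputs are outside Pre_)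
def pvDigitInt (c : Char) : Int := (c.toNat : Int) - 48

-- ===== PORT A =====
-- A's inner `helper(i, flag)`: recursion over the remaining suffix of n's digit list
def pvHelperA (As : List Int) : List Int → Bool → Option (List Int)
  | [], _ => some []
  | ni :: rest, flag =>
    (if flag then As else As.filter (fun d => decide (d ≤ ni))).findSome?
      (fun d => (pvHelperA As rest (flag || decide (d < ni))).map (fun r => d :: r))

def largest_number_less_than_n (n : Int) (A : List Int) : Int :=
  let nd := (PySem.Int.toChars n).map pvDigitInt      -- n = list(str(n)); int(n[i]) precomputed
  let As := PySem.List.sorted A (fun x => x) true     -- A = sorted(A, reverse=True)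
  match pvHelperA As nd false with
  | some res => (PySem.Int.ofChars? ((res.map PySem.Int.toChars).flatten)).getD 0  -- int(''.join(map(str, res)))
  | none => 0  -- Python raises TypeError here (helper returned None); outside Pre_

-- ===== PORT B =====
def pvBestBelow (digits : List Int) (d : Int) : Option Int :=
  PySem.List.max? (digits.filter (fun a => decide (a < d))) (fun x => x)

def pvGo (digits : List Int) (mx : Int) : List Int → Option (List Int)
  | [] => some []
  | d0 :: rest =>
    match (if digits.contains d0 then (pvGo digits mx rest).map (fun t => d0 :: t) else none) with
    | some r => some r
    | none =>
      match pvBestBelow digits d0 with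
      | some b => some (b :: List.replicate rest.length mx)
      | none => none

def largest_number_less_than_n_alt (n : Int) (A : List Int) : Int :=
  let digits := PySem.Set.ofList A
  let mx := (PySem.List.max? digits (fun x => x)).getD 0   -- max(digits); raises on empty A (outside Pre_)
  let nd := (PySem.Int.toChars n).map pvDigitInt
  match pvGo digits mx nd with
  | some res => (PySem.Int.ofChars? ((res.map PySem.Int.toChars).flatten)).getD 0
  | none => 0

-- ===== PRECONDITION & SPEC =====
-- Pre_ = exactly where Python A returns normally: n >= 0 (else int('-') raises ValueError), a result
-- must be buildable (else helper yields None and A raises TypeError: either every digit of n is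
-- available in A, or there is a (unique) last position i whose prefix is matchable and where a
-- smaller entry exists), and the assembled numeral must parse (a negative entry may appear only as
-- the leading element: the dropped digit at position i > 0 and any padding must be nonnegative,
-- else int(...) raises ValueError on an interior '-').
def Pre_largest_number_less_than_n (n : Int) (A : List Int) : Prop :=
  0 ≤ n ∧
  (let nd := (PySem.Int.toChars n).map pvDigitInt
   (∀ d ∈ nd, d ∈ A) ∨
   ∃ i ∈ List.range nd.length,
     (∀ j ∈ List.range i, nd.getD j 0 ∈ A) ∧ (∃ a ∈ A, a < nd.getD i 0) ∧
     (∀ j ∈ List.range nd.length, i < j →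
        (∀ l ∈ List.range j, nd.getD l 0 ∈ A) → ¬ ∃ a ∈ A, a < nd.getD j 0) ∧
     (0 < i → ∃ a ∈ A, 0 ≤ a ∧ a < nd.getD i 0) ∧
     (i + 1 < nd.length → ∃ a ∈ A, 0 ≤ a))
instance (n : Int) (A : List Int) : Decidable (Pre_largest_number_less_than_n n A) := by
  unfold Pre_largest_number_less_than_n; infer_instance

def pvWitness_largest_number_less_than_n : Int × List Int := (21, [1, 2])

def Spec_largest_number_less_than_n (n : Int) (A : List Int) (out : Int) : Prop := out = largest_number_less_than_n_alt n A
instance (n : Int) (A : List Int) (out : Int) : Decidable (Spec_largest_number_less_than_n n A out) := by unfold Spec_largest_number_less_than_n; infer_instance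

-- ===== CLAIM (what is proved, stated in full; the proofs are below) =====
def Claim_equal_largest_number_less_than_n : Prop := ∀ (n : Int) (A : List Int), Dom_largest_number_less_than_n n A → Pre_largest_number_less_than_n n A → Spec_largest_number_less_than_n n A (largest_number_less_than_n n A)

-- ===== LEMMAS AND PROOFS =====

theorem pvHelperA_true (As : List Int) (hAs : As ≠ []) :
    ∀ nd : List Int, pvHelperA As nd true = some (List.replicate nd.length (As.headD 0)) := by
  have hgen : ∀ (l : List Int) (d : Int), l.head?.getD d = l.headD d := by
    intro l d; cases l <;> simp
  intro nd
  induction nd with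
  | nil => simp [pvHelperA]
  | cons ni rest ih =>
    obtain ⟨a, t, rfl⟩ := List.exists_cons_of_ne_nil hAs
    simp [pvHelperA, ih, List.replicate_succ]

theorem pvHead_eq_max (A : List Int) (hA : A ≠ []) :
    (PySem.List.sorted A (fun x => x) true).headD 0
      = ((PySem.List.max? (PySem.Set.ofList A) (fun x => x)).getD 0) := by
  set As := PySem.List.sorted A (fun x => x) true with hAsdef
  have hperm := PySem.List.sorted_perm A (fun x => x) true
  have hAs : As ≠ [] := fun h => hA ((PySem.List.sorted_eq_nil_iff A (fun x => x) true).mp h)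
  obtain ⟨a, t, hcons⟩ := List.exists_cons_of_ne_nil hAs
  have hmemAs : ∀ x : Int, x ∈ As ↔ x ∈ A := fun x => hperm.mem_iff
  have hS : ∀ x : Int, x ∈ PySem.Set.ofList A ↔ x ∈ A := fun x => PySem.Set.mem_ofList A x
  have hSne : PySem.Set.ofList A ≠ [] := by
    obtain ⟨b, hb⟩ := List.exists_mem_of_ne_nil A hA
    intro h; rw [← hS b] at hb; simp [h] at hb
  obtain ⟨m, hm⟩ : ∃ m, PySem.List.max? (PySem.Set.ofList A) (fun x => x) = some m := by
    cases h : PySem.List.max? (PySem.Set.ofList A) (fun x => x) with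
    | none => exact absurd ((PySem.List.max?_eq_none_iff _ _).mp h) hSne
    | some m => exact ⟨m, rfl⟩
  have hmmem : m ∈ A := (hS m).mp (PySem.List.max?_mem hm)
  have hpair : As.Pairwise (fun x y => (fun z : Int => z) y ≤ (fun z : Int => z) x) :=
    PySem.List.sorted_pairwise_rev A (fun x => x)
  have hma : m ≤ a := by
    have hmAs : m ∈ As := (hmemAs m).mpr hmmem
    rw [hcons] at hmAs hpair
    rcases List.mem_cons.mp hmAs with h | h
    · omega
    · exact (List.pairwise_cons.mp hpair).1 m h
  have ham : a ≤ m := by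
    have : a ∈ A := (hmemAs a).mp (by simp [hcons])
    exact PySem.List.max?_isMax hm a ((hS a).mpr this)
  simp [hcons, hm]
  omega

theorem pvFindFirstMax (ni m : Int) :
    ∀ C : List Int, C.Pairwise (fun x y : Int => y ≤ x) →
      C.find? (fun c => decide (c < ni)) = some m → ∀ b ∈ C, b < ni → b ≤ m := by
  intro C
  induction C with
  | nil => intro _ h; simp at h
  | cons c0 C' ih =>
    intro hp hf b hb hbni
    obtain ⟨hhead, htail⟩ := List.pairwise_cons.mp hp
    by_cases h0 : c0 < ni
    · have : m = c0 := by simp [h0] at hf; omega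
      subst this
      rcases List.mem_cons.mp hb with rfl | h
      · omega
      · exact hhead b h
    · simp only [List.find?_cons, decide_eq_false h0] at hf
      rcases List.mem_cons.mp hb with rfl | h
      · omega
      · exact ih htail hf b h hbni

theorem pvFind_eq_bestBelow (A : List Int) (ni : Int) :
    ((PySem.List.sorted A (fun x => x) true).filter (fun d => decide (d ≤ ni))).find?
        (fun c => decide (c < ni))
      = pvBestBelow (PySem.Set.ofList A) ni := by
  set As := PySem.List.sorted A (fun x => x) true with hAsdef
  set C := As.filter (fun d => decide (d ≤ ni)) with hCdef
  have hmemAs : ∀ x : Int, x ∈ As ↔ x ∈ A := fun x => (PySem.List.sorted_perm A (fun x => x) true).mem_iff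
  have hS : ∀ x : Int, x ∈ PySem.Set.ofList A ↔ x ∈ A := fun x => PySem.Set.mem_ofList A x
  unfold pvBestBelow
  cases hb : PySem.List.max? ((PySem.Set.ofList A).filter (fun a => decide (a < ni))) (fun x => x) with
  | none =>
    have hnil := (PySem.List.max?_eq_none_iff _ _).mp hb
    rw [List.find?_eq_none]
    intro c hc
    simp only [decide_eq_true_eq]
    intro hcni
    have hcA : c ∈ A := (hmemAs c).mp (List.mem_of_mem_filter hc)
    have : c ∈ (PySem.Set.ofList A).filter (fun a => decide (a < ni)) :=
      List.mem_filter.mpr ⟨(hS c).mpr hcA, by simpa using hcni⟩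
    simp [hnil] at this
  | some b =>
    have hbmem := PySem.List.max?_mem hb
    have hbA : b ∈ A := (hS b).mp (List.mem_of_mem_filter hbmem)
    have hbni : b < ni := by
      have := (List.mem_filter.mp hbmem).2; simpa using this
    have hbC : b ∈ C := List.mem_filter.mpr ⟨(hmemAs b).mpr hbA, by simp; omega⟩
    obtain ⟨m, hm⟩ : ∃ m, C.find? (fun c => decide (c < ni)) = some m := by
      cases hf : C.find? (fun c => decide (c < ni)) with
      | none =>
        exfalso
        have := List.find?_eq_none.mp hf b hbC
        simp [hbni] at this
      | some m => exact ⟨m, rfl⟩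
    have hmC := List.mem_of_find?_eq_some hm
    have hmni : m < ni := by have := List.find?_some hm; simpa using this
    have hmA : m ∈ A := (hmemAs m).mp (List.mem_of_mem_filter hmC)
    have hmb : m ≤ b :=
      PySem.List.max?_isMax hb m (List.mem_filter.mpr ⟨(hS m).mpr hmA, by simpa using hmni⟩)
    have hpairC : C.Pairwise (fun x y : Int => y ≤ x) := by
      have := PySem.List.sorted_pairwise_rev A (fun x => x)
      exact List.Pairwise.filter _ this
    have hbm : b ≤ m := pvFindFirstMax ni m C hpairC hm b hbC hbni
    rw [hm]; congr 1; omega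

theorem pvSkipBlock (As rest : List Int) (ni : Int)
    (hnone : pvHelperA As rest false = none ∨ ni ∉ As) :
    ∀ C : List Int, (∀ c ∈ C, c ≤ ni) → (∀ c ∈ C, c ∈ As) →
      C.findSome? (fun d => (pvHelperA As rest (false || decide (d < ni))).map (fun r => d :: r))
        = (C.find? (fun c => decide (c < ni))).map
            (fun b => b :: List.replicate rest.length (As.headD 0)) := by
  intro C
  induction C with
  | nil => simp
  | cons c C' ih =>
    intro hle hmem
    have hcAs : c ∈ As := hmem c (by simp)
    have hAsne : As ≠ [] := List.ne_nil_of_mem hcAs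
    by_cases hlt : c < ni
    · simp [decide_eq_true hlt, pvHelperA_true As hAsne rest]
    · have hceq : c = ni := by have := hle c (by simp); omega
      have hrnone : pvHelperA As rest false = none := by
        rcases hnone with h | h
        · exact h
        · exact absurd (hceq ▸ hcAs) h
      simp only [List.findSome?_cons, List.find?_cons, decide_eq_false hlt, Bool.or_false,
        hrnone, Option.map_none]
      exact ih (fun x hx => hle x (by simp [hx])) (fun x hx => hmem x (by simp [hx]))

theorem pvHelperA_eq_pvGo (A : List Int) :
    ∀ nd : List Int,
      pvHelperA (PySem.List.sorted A (fun x => x) true) nd false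
        = pvGo (PySem.Set.ofList A) ((PySem.List.max? (PySem.Set.ofList A) (fun x => x)).getD 0) nd := by
  set As := PySem.List.sorted A (fun x => x) true with hAsdef
  set S := PySem.Set.ofList A with hSdef
  set mx := (PySem.List.max? S (fun x => x)).getD 0 with hmxdef
  have hmemAs : ∀ x : Int, x ∈ As ↔ x ∈ A := fun x => (PySem.List.sorted_perm A (fun x => x) true).mem_iff
  have hmemS : ∀ x : Int, x ∈ S ↔ x ∈ A := fun x => PySem.Set.mem_ofList A x
  have hgen : ∀ (l : List Int) (d : Int), l.head?.getD d = l.headD d := by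
    intro l d; cases l <;> simp
  intro nd
  induction nd with
  | nil => simp [pvHelperA, pvGo]
  | cons ni rest ih =>
    have hC : ∀ c ∈ As.filter (fun d => decide (d ≤ ni)), c ≤ ni := by
      intro c hc; simpa using (List.mem_filter.mp hc).2
    have hCAs : ∀ c ∈ As.filter (fun d => decide (d ≤ ni)), c ∈ As := by
      intro c hc; exact List.mem_of_mem_filter hc
    by_cases hni : ni ∈ A
    · have hcont : ni ∈ S := (hmemS ni).mpr hni
      cases hrest : pvHelperA As rest false with
      | some t0 =>
        -- equal-digit step succeeds on both sides
        have hniC : ni ∈ As.filter (fun d => decide (d ≤ ni)) :=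
          List.mem_filter.mpr ⟨(hmemAs ni).mpr hni, by simp⟩
        obtain ⟨c0, C', hCcons⟩ := List.exists_cons_of_ne_nil (List.ne_nil_of_mem hniC)
        have hc0eq : c0 = ni := by
          have h1 : c0 ≤ ni := hC c0 (by rw [hCcons]; simp)
          have hpair : (As.filter (fun d => decide (d ≤ ni))).Pairwise (fun x y : Int => y ≤ x) :=
            List.Pairwise.filter _ (PySem.List.sorted_pairwise_rev A (fun x => x))
          rw [hCcons] at hniC hpair
          rcases List.mem_cons.mp hniC with h | h
          · omega
          · have := (List.pairwise_cons.mp hpair).1 ni h; omega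
        have hLHS : pvHelperA As (ni :: rest) false = some (ni :: t0) := by
          show (if false then As else As.filter (fun d => decide (d ≤ ni))).findSome?
              (fun d => (pvHelperA As rest (false || decide (d < ni))).map (fun r => d :: r)) = _
          rw [if_neg (by simp), hCcons, List.findSome?_cons]
          subst hc0eq
          simp [hrest]
        rw [hLHS]
        simp [pvGo, hcont, ← ih, hrest]
      | none =>
        have hLHS := pvSkipBlock As rest ni (Or.inl hrest) (As.filter (fun d => decide (d ≤ ni))) hC hCAs
        show (if false then As else As.filter (fun d => decide (d ≤ ni))).findSome? _ = pvGo S mx (ni :: rest)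
        rw [if_neg (by simp), hLHS, pvFind_eq_bestBelow A ni]
        cases hbb : pvBestBelow S ni with
        | none => simp [pvGo, hcont, ← ih, hrest, hbb]
        | some b =>
          have hbA : b ∈ A := by
            have := PySem.List.max?_mem (by simpa [pvBestBelow] using hbb)
            exact (hmemS b).mp (List.mem_of_mem_filter this)
          have hhm : As.head?.getD 0 = mx := by
            rw [hgen, hmxdef, hSdef, hAsdef]; exact pvHead_eq_max A (List.ne_nil_of_mem hbA)
          simp [pvGo, hcont, ← ih, hrest, hbb, hhm]
    · have hcont : ni ∉ S := fun h => hni ((hmemS ni).mp h)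
      have hniAs : ni ∉ As := fun h => hni ((hmemAs ni).mp h)
      have hLHS := pvSkipBlock As rest ni (Or.inr hniAs) (As.filter (fun d => decide (d ≤ ni))) hC hCAs
      show (if false then As else As.filter (fun d => decide (d ≤ ni))).findSome? _ = pvGo S mx (ni :: rest)
      rw [if_neg (by simp), hLHS, pvFind_eq_bestBelow A ni]
      cases hbb : pvBestBelow S ni with
      | none => simp [pvGo, hcont, hbb]
      | some b =>
        have hbA : b ∈ A := by
          have := PySem.List.max?_mem (by simpa [pvBestBelow] using hbb)
          exact (hmemS b).mp (List.mem_of_mem_filter this)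
        have hhm : As.head?.getD 0 = mx := by
          rw [hgen, hmxdef, hSdef, hAsdef]; exact pvHead_eq_max A (List.ne_nil_of_mem hbA)
        simp [pvGo, hcont, hbb, hhm]

-- ===== VERDICT (by name: the statement is the Claim_ definition above) =====
theorem largest_number_less_than_n_spec : Claim_equal_largest_number_less_than_n := by
  intro n A _ _
  unfold Spec_largest_number_less_than_n
  unfold largest_number_less_than_n largest_number_less_than_n_alt
  simp only [pvHelperA_eq_pvGo]
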